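-- pv_equiv track=rewrite | github.com/ansariimran/small-python-programs | Operations_to_makezero_fromfirstInteger.py | Operations_to_makezero_fromfirstInteger
-- ===== SOURCE A (Python) =====
-- def Operations_to_makezero_fromfirstInteger(N):
--     count = 0
--     cond = True
--
--     if N <= 1000000000 and N >=1:
--         while cond:
--             first = str(N)
--             first_digit = int(first[0])
--
--             if N == 0:
--                 cond = False
--             else:
--                 N = N - first_digit
--                 count = count + 1
--         return count
-- ===== SOURCE B (Python) =====
-- def Operations_to_makezero_fromfirstInteger(N):
--     if N < 1 or N > 1000000000:
--         return None
--     count = 0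
--     while N > 0:
--         # leading digit d and its place value p (so d*p <= N < (d+1)*p)
--         d, p = N, 1
--         while d >= 10:
--             d //= 10
--             p *= 10
--         L = d * p
--         # batch all steps whose leading digit is d: after t steps N drops below L
--         t = (N - L) // d + 1
--         N -= t * d
--         count += t
--     return count
-- ===== Notes on version B (the rewrite author's own statement) =====
-- stated objective: faster
-- what changed: Instead of subtracting the leading digit one step at a time (reading it from str(N) each iteration), B finds the leading digit d and its place value by integer division and batches with one division all t steps during which the leading digit stays d, jumping straight to the next digit boundary.
import Mathlib
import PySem

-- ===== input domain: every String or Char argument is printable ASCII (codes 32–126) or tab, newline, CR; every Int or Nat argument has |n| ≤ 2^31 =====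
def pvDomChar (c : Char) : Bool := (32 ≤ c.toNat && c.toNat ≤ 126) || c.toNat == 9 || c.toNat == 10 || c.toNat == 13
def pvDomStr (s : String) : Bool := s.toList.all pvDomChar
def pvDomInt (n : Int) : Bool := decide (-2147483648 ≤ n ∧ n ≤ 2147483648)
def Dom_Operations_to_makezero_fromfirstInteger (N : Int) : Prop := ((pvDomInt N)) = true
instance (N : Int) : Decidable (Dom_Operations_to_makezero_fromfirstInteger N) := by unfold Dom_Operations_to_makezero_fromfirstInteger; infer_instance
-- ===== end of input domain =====

-- B replaces A's one-subtraction-per-loop-iteration (leading digit re-read from str(N) each time,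
-- O(N) iterations) by batching all steps sharing one leading digit with a single division (O(log²N)).

-- ===== PORT A =====
-- the while loop: each iteration reads first = str(N), first_digit = int(first[0]), then either
-- stops (N == 0) or subtracts and counts.  Fuel N.toNat+1 bounds the iterations (N drops by ≥ 1
-- each time); the `none` branches (fuel out / empty string / unparsable digit) are unreachable.
def pvLoopA (fuel : Nat) (N count : Int) : Option Int :=
  match fuel with
  | 0 => none
  | f + 1 =>
    match PySem.Str.pyGet? (PySem.Int.toStr N) 0 with     -- first = str(N); first[0]
    | none => none
    | some c =>
      match PySem.Int.ofChars? [c] with                   -- int(first[0])  (a 1-char string)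
      | none => none
      | some fd =>
        if N = 0 then some count
        else pvLoopA f (N - fd) (count + 1)

def Operations_to_makezero_fromfirstInteger (N : Int) : Option Int :=
  if N ≤ 1000000000 ∧ N ≥ 1 then pvLoopA (N.toNat + 1) N 0 else none

-- ===== PORT B =====
-- inner `while d >= 10: d //= 10; p *= 10` of Source B
def pvMsd (d p : Int) : Int × Int :=
  if 10 ≤ d then pvMsd (PySem.Int.floordiv d 10) (p * 10) else (d, p)
termination_by d.toNat
decreasing_by
  simp only [PySem.Int.floordiv_eq_ediv_of_pos (by norm_num : (0:Int) < 10)]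
  omega

-- outer `while N > 0` of Source B; its iteration count is O(log²N) (≤ 90 on the guarded range),
-- fuel 128 is only a totality bound
def pvLoopB (fuel : Nat) (N count : Int) : Option Int :=
  match fuel with
  | 0 => none
  | f + 1 =>
    if 0 < N then
      let dp := pvMsd N 1
      let L := dp.1 * dp.2
      let t := PySem.Int.floordiv (N - L) dp.1 + 1
      pvLoopB f (N - t * dp.1) (count + t)
    else some count

def Operations_to_makezero_fromfirstInteger_alt (N : Int) : Option Int :=
  if N < 1 ∨ N > 1000000000 then none else pvLoopB 128 N 0

-- ===== PRECONDITION & SPEC =====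
def Spec_Operations_to_makezero_fromfirstInteger (N : Int) (out : Option Int) : Prop := out = Operations_to_makezero_fromfirstInteger_alt N
instance (N : Int) (out : Option Int) : Decidable (Spec_Operations_to_makezero_fromfirstInteger N out) := by unfold Spec_Operations_to_makezero_fromfirstInteger; infer_instance

-- ===== CLAIM (what is proved, stated in full; the proofs are below) =====
def Claim_equal_Operations_to_makezero_fromfirstInteger : Prop := ∀ (N : Int), Dom_Operations_to_makezero_fromfirstInteger N → Spec_Operations_to_makezero_fromfirstInteger N (Operations_to_makezero_fromfirstInteger N)

-- ===== LEMMAS AND PROOFS =====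

-- most significant decimal digit of n, and the reference step count both loops compute
def pvMsdN (n : Nat) : Nat := n / 10 ^ Nat.log 10 n

lemma pvMsdN_pos (n : Nat) (h : n ≠ 0) : 0 < pvMsdN n :=
  Nat.div_pos (Nat.pow_log_le_self 10 h) (Nat.pow_pos (by norm_num))

lemma pvMsdN_le (n : Nat) : pvMsdN n ≤ n := Nat.div_le_self _ _

lemma pvMsdN_lt_ten (n : Nat) : pvMsdN n < 10 := by
  have := Nat.lt_pow_succ_log_self (by norm_num : 1 < 10) n
  exact (Nat.div_lt_iff_lt_mul (Nat.pow_pos (by norm_num))).mpr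
    (by rw [← pow_succ']; exact this)

def pvSteps (n : Nat) : Nat :=
  if h : n = 0 then 0 else 1 + pvSteps (n - pvMsdN n)
termination_by n
decreasing_by have := pvMsdN_pos n h; have := pvMsdN_le n; omega

lemma pvSteps_zero : pvSteps 0 = 0 := by simp [pvSteps]

lemma pvSteps_pos (n : Nat) (h : n ≠ 0) : pvSteps n = 1 + pvSteps (n - pvMsdN n) := by
  rw [pvSteps]; simp [h]

-- characterisation of the block d*10^k ≤ n < (d+1)*10^k
lemma pvLog_block (d k n : Nat) (h1 : 1 ≤ d) (h2 : d ≤ 9)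
    (hlo : d * 10 ^ k ≤ n) (hhi : n < (d + 1) * 10 ^ k) :
    Nat.log 10 n = k ∧ pvMsdN n = d := by
  have hk : Nat.log 10 n = k := by
    refine Nat.log_eq_of_pow_le_of_lt_pow ?_ ?_
    · calc 10 ^ k = 1 * 10 ^ k := (one_mul _).symm
        _ ≤ d * 10 ^ k := Nat.mul_le_mul_right _ h1
        _ ≤ n := hlo
    · calc n < (d + 1) * 10 ^ k := hhi
        _ ≤ 10 * 10 ^ k := Nat.mul_le_mul_right _ (by omega)
        _ = 10 ^ (k + 1) := (pow_succ' 10 k).symm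
  refine ⟨hk, ?_⟩
  unfold pvMsdN
  rw [hk]
  exact Nat.div_eq_of_lt_le hlo hhi

-- ===== A-side: the first character of str(n) is the most significant digit =====

lemma pvToDigitsCore_head : ∀ (f n k : Nat) (acc : List Char), 10 ^ k ≤ n → n < 10 ^ (k + 1) →
    n < 10 ^ f →
    ∃ rest, Nat.toDigitsCore 10 f n acc = Nat.digitChar (n / 10 ^ k) :: rest := by
  intro f
  induction f with
  | zero =>
    intro n k acc hlo _ hf
    have := Nat.pow_pos (show 0 < (10:Nat) by norm_num) (n := k)
    simp at hf; omega
  | succ f ih =>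
    intro n k acc hlo hhi hf
    have h10 : 0 < (10:Nat) := by norm_num
    rw [Nat.toDigitsCore]
    by_cases hd : n / 10 = 0
    · -- n < 10, so k = 0 and the digit is n itself
      have hn10 : n < 10 := by omega
      have hk0 : k = 0 := by
        by_contra hk
        have : (10:Nat)^1 <= 10^k := Nat.pow_le_pow_right (by norm_num) (by omega)
        simp at this; omega
      subst hk0
      rw [if_pos hd]
      exact Exists.intro acc (by simp [Nat.mod_eq_of_lt hn10])
    · -- n >= 10: recurse on n / 10 with k - 1
      have hn10 : 10 <= n := by omega
      have hk1 : 1 <= k := by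
        by_contra hk
        have hk0 : k = 0 := by omega
        subst hk0
        simp at hhi; omega
      have hlo' : 10 ^ (k - 1) <= n / 10 := by
        rw [Nat.le_div_iff_mul_le h10]
        calc 10 ^ (k-1) * 10 = 10 ^ (k - 1 + 1) := (pow_succ 10 (k-1)).symm
          _ = 10 ^ k := by congr 1; omega
          _ <= n := hlo
      have hhi' : n / 10 < 10 ^ (k - 1 + 1) := by
        rw [show k - 1 + 1 = k from by omega, Nat.div_lt_iff_lt_mul h10, ← pow_succ]
        exact hhi
      have hf' : n / 10 < 10 ^ f := by
        rw [Nat.div_lt_iff_lt_mul h10, ← pow_succ]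
        exact hf
      obtain ⟨rest, hrest⟩ := ih (n / 10) (k - 1) (Nat.digitChar (n % 10) :: acc) hlo' hhi' hf'
      refine Exists.intro rest ?_
      rw [if_neg hd, hrest]
      rw [Nat.div_div_eq_div_mul, ← pow_succ', show k - 1 + 1 = k from by omega]

lemma pvToChars_head (n : Nat) (h : 0 < n) :
    ∃ rest, PySem.Int.toChars (n : Int) = Nat.digitChar (pvMsdN n) :: rest := by
  have hlo := Nat.pow_log_le_self 10 (by omega : n ≠ 0)
  have hhi : n < 10 ^ (Nat.log 10 n + 1) := Nat.lt_pow_succ_log_self (by norm_num) n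
  have hf : n < 10 ^ (n + 1) := by
    calc n < 2 ^ n := Nat.lt_two_pow_self
      _ ≤ 10 ^ n := Nat.pow_le_pow_left (by norm_num) n
      _ ≤ 10 ^ (n + 1) := Nat.pow_le_pow_right (by norm_num) (by omega)
  obtain ⟨rest, hrest⟩ := pvToDigitsCore_head (n + 1) n (Nat.log 10 n) [] hlo hhi hf
  refine Exists.intro rest ?_
  unfold PySem.Int.toChars
  rw [if_neg (by omega)]
  simpa [Nat.toDigits, pvMsdN] using hrest

lemma pvOfChars_digitChar (d : Nat) (h : d < 10) :
    PySem.Int.ofChars? [Nat.digitChar d] = some (d : Int) := by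
  interval_cases d <;> decide

lemma pvLoopA_eq : ∀ (fuel n : Nat) (c : Int), n < fuel →
    pvLoopA fuel (n : Int) c = some (c + (pvSteps n : Int)) := by
  intro fuel
  induction fuel with
  | zero => intro n c hn; omega
  | succ f ih =>
    intro n c hn
    by_cases h0 : n = 0
    · subst h0
      have h1 : PySem.List.pyGet? (PySem.Int.toChars 0) 0 = some '0' := by decide
      have h2 : PySem.Int.ofChars? ['0'] = some 0 := by decide
      simp [pvLoopA, h1, h2, pvSteps_zero]
    · have hpos : 0 < n := by omega
      have hd1 : 0 < pvMsdN n := pvMsdN_pos n h0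
      have hd10 : pvMsdN n < 10 := pvMsdN_lt_ten n
      have hdle : pvMsdN n ≤ n := pvMsdN_le n
      obtain ⟨rest, hrest⟩ := pvToChars_head n hpos
      have hg : PySem.Str.pyGet? (PySem.Int.toStr (n : Int)) 0 = some (Nat.digitChar (pvMsdN n)) := by
        rw [show (0:Int) = ((0:Nat):Int) from rfl, PySem.Str.pyGet?_natCast,
          PySem.Int.toList_toStr, hrest]
        rfl
      have hne : ((n:Int)) ≠ 0 := by exact_mod_cast h0
      simp only [pvLoopA, hg, pvOfChars_digitChar (pvMsdN n) hd10, if_neg hne]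
      rw [show (n:Int) - (pvMsdN n : Int) = ((n - pvMsdN n : Nat) : Int) from by
        rw [Nat.cast_sub hdle]]
      rw [ih (n - pvMsdN n) (c + 1) (by omega)]
      rw [pvSteps_pos n h0]
      push_cast
      ring_nf

-- ===== B-side =====

lemma pvMsd_spec : ∀ (n a : Nat), 0 < n →
    pvMsd (n : Int) (a : Int) = ((pvMsdN n : Int), ((a * 10 ^ Nat.log 10 n : Nat) : Int)) := by
  intro n
  induction n using Nat.strong_induction_on with
  | _ n ih =>
    intro a hn
    rw [pvMsd]
    by_cases h10 : 10 ≤ n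
    · rw [if_pos (by exact_mod_cast h10)]
      have hfd : PySem.Int.floordiv (n : Int) 10 = ((n / 10 : Nat) : Int) := by
        rw [show (10:Int) = ((10:Nat):Int) from rfl, PySem.Int.floordiv_natCast]
      have hca : ((a:Int)) * 10 = ((a * 10 : Nat) : Int) := by push_cast; ring
      rw [hfd, hca, ih (n / 10) (by omega) (a * 10) (by omega)]
      have hlogpos : 0 < Nat.log 10 n := Nat.log_pos (by norm_num) h10
      have hlog : Nat.log 10 (n / 10) = Nat.log 10 n - 1 := Nat.log_div_base 10 n
      have hmsd : pvMsdN (n / 10) = pvMsdN n := by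
        unfold pvMsdN
        rw [hlog, Nat.div_div_eq_div_mul, ← pow_succ', show Nat.log 10 n - 1 + 1 = Nat.log 10 n from by omega]
      have hpow : a * 10 * 10 ^ Nat.log 10 (n / 10) = a * 10 ^ Nat.log 10 n := by
        rw [hlog, mul_assoc, ← pow_succ', show Nat.log 10 n - 1 + 1 = Nat.log 10 n from by omega]
      rw [hmsd, hpow]
    · rw [if_neg (by exact_mod_cast h10)]
      have hlog : Nat.log 10 n = 0 := Nat.log_of_lt (by omega)
      unfold pvMsdN
      rw [hlog]
      simp

lemma pvSteps_batch : ∀ (n : Nat), ∀ (d k : Nat), 1 ≤ d → d ≤ 9 → d * 10 ^ k ≤ n →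
    n < (d + 1) * 10 ^ k →
    pvSteps n = ((n - d * 10 ^ k) / d + 1) + pvSteps (n - ((n - d * 10 ^ k) / d + 1) * d) := by
  intro n
  induction n using Nat.strong_induction_on with
  | _ n ih =>
    intro d k h1 h2 hlo hhi
    have hLpos : 0 < d * 10 ^ k :=
      Nat.mul_pos (by omega) (Nat.pow_pos (by norm_num))
    have hn0 : n ≠ 0 := by omega
    obtain ⟨hk, hmsd⟩ := pvLog_block d k n h1 h2 hlo hhi
    rw [pvSteps_pos n hn0, hmsd]
    by_cases hc : n - d < d * 10 ^ k
    · have hlt : n - d * 10 ^ k < d := by omega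
      rw [Nat.div_eq_of_lt hlt]
      norm_num
    · have hge : d * 10 ^ k ≤ n - d := by omega
      have hrec := ih (n - d) (by omega) d k h1 h2 hge
        (lt_of_le_of_lt (Nat.sub_le n d) hhi)
      rw [hrec]
      have hdnL : d ≤ n - d * 10 ^ k + d := by omega
      have hq : (n - d - d * 10 ^ k) / d + 1 = (n - d * 10 ^ k) / d := by
        have he : n - d - d * 10 ^ k + d = n - d * 10 ^ k := by omega
        rw [← he, Nat.add_div_right _ (by omega)]
      have hmul : ((n - d - d * 10 ^ k) / d + 1) * d = (n - d * 10 ^ k) / d * d := by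
        rw [hq]
      have hexp1 : ((n - d * 10 ^ k) / d + 1) * d = (n - d * 10 ^ k) / d * d + d := by ring
      have harg : n - d - ((n - d - d * 10 ^ k) / d + 1) * d
          = n - ((n - d * 10 ^ k) / d + 1) * d := by
        rw [hmul, hexp1]; omega
      rw [harg, hq]
      omega

def pvMu (n : Nat) : Nat := 9 * Nat.log 10 n + pvMsdN n

lemma pvMu_lt (d k n n' : Nat) (h1 : 1 ≤ d) (h2 : d ≤ 9)
    (hlo : d * 10 ^ k ≤ n) (hhi : n < (d + 1) * 10 ^ k) (hn' : n' < d * 10 ^ k) :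
    pvMu n' < pvMu n := by
  obtain ⟨hk, hmsd⟩ := pvLog_block d k n h1 h2 hlo hhi
  unfold pvMu
  rw [hk, hmsd]
  by_cases h0 : n' = 0
  · subst h0
    simp [pvMsdN]
    omega
  · have hpow : 0 < (10:Nat) ^ k := Nat.pow_pos (by norm_num)
    have hlog' : Nat.log 10 n' ≤ k := by
      have hup : n' < 10 ^ (k + 1) := by
        calc n' < d * 10 ^ k := hn'
          _ ≤ 10 * 10 ^ k := Nat.mul_le_mul_right _ (by omega)
          _ = 10 ^ (k + 1) := (pow_succ' 10 k).symm
      have := Nat.log_lt_of_lt_pow h0 hup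
      omega
    by_cases heq : Nat.log 10 n' = k
    · have hm : pvMsdN n' < d := by
        unfold pvMsdN
        rw [heq]
        exact (Nat.div_lt_iff_lt_mul hpow).mpr hn'
      omega
    · have hm := pvMsdN_lt_ten n'
      omega

lemma pvLoopB_eq : ∀ (fuel n : Nat) (c : Int), pvMu n < fuel →
    pvLoopB fuel (n : Int) c = some (c + (pvSteps n : Int)) := by
  intro fuel
  induction fuel with
  | zero => intro n c hn; omega
  | succ f ih =>
    intro n c hmu
    by_cases h0 : n = 0
    · subst h0
      simp [pvLoopB, pvSteps_zero]
    · have hn : 0 < n := by omega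
      have hpow : 0 < (10:Nat) ^ Nat.log 10 n := Nat.pow_pos (by norm_num)
      have hd1 : 0 < pvMsdN n := pvMsdN_pos n h0
      have hd10 : pvMsdN n < 10 := pvMsdN_lt_ten n
      have hlo : pvMsdN n * 10 ^ Nat.log 10 n ≤ n := Nat.div_mul_le_self n _
      have hhi : n < (pvMsdN n + 1) * 10 ^ Nat.log 10 n :=
        (Nat.div_lt_iff_lt_mul hpow).mp (Nat.lt_succ_self _)
      have hm := pvMsd_spec n 1 hn
      rw [show ((1:Nat):Int) = (1:Int) from rfl] at hm
      simp only [pvLoopB, if_pos (show (0:Int) < (n:Int) by exact_mod_cast hn), hm]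
      have hcastL : (pvMsdN n : Int) * ((1 * 10 ^ Nat.log 10 n : Nat) : Int)
          = ((pvMsdN n * 10 ^ Nat.log 10 n : Nat) : Int) := by push_cast; ring
      have hfd : PySem.Int.floordiv ((n:Int) - ((pvMsdN n * 10 ^ Nat.log 10 n : Nat) : Int)) (pvMsdN n : Int)
          = (((n - pvMsdN n * 10 ^ Nat.log 10 n) / pvMsdN n : Nat) : Int) := by
        rw [show (n:Int) - ((pvMsdN n * 10 ^ Nat.log 10 n : Nat) : Int)
            = ((n - pvMsdN n * 10 ^ Nat.log 10 n : Nat) : Int) from by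
          rw [Nat.cast_sub hlo], PySem.Int.floordiv_natCast]
      have hqd : (n - pvMsdN n * 10 ^ Nat.log 10 n) / pvMsdN n * pvMsdN n
          ≤ n - pvMsdN n * 10 ^ Nat.log 10 n := Nat.div_mul_le_self _ _
      have hdL : pvMsdN n ≤ pvMsdN n * 10 ^ Nat.log 10 n :=
        Nat.le_mul_of_pos_right _ hpow
      have htd : ((n - pvMsdN n * 10 ^ Nat.log 10 n) / pvMsdN n + 1) * pvMsdN n
          = (n - pvMsdN n * 10 ^ Nat.log 10 n) / pvMsdN n * pvMsdN n + pvMsdN n := by ring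
      have hlt : n - pvMsdN n * 10 ^ Nat.log 10 n
          < ((n - pvMsdN n * 10 ^ Nat.log 10 n) / pvMsdN n + 1) * pvMsdN n :=
        (Nat.div_lt_iff_lt_mul hd1).mp (Nat.lt_succ_self _)
      have htle : ((n - pvMsdN n * 10 ^ Nat.log 10 n) / pvMsdN n + 1) * pvMsdN n ≤ n := by
        omega
      have hcastN : (n:Int) - ((((n - pvMsdN n * 10 ^ Nat.log 10 n) / pvMsdN n : Nat) : Int) + 1) * (pvMsdN n : Int)
          = ((n - ((n - pvMsdN n * 10 ^ Nat.log 10 n) / pvMsdN n + 1) * pvMsdN n : Nat) : Int) := by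
        rw [Nat.cast_sub htle]; push_cast; ring
      have hn'lt : n - ((n - pvMsdN n * 10 ^ Nat.log 10 n) / pvMsdN n + 1) * pvMsdN n
          < pvMsdN n * 10 ^ Nat.log 10 n := by omega
      have hmu' : pvMu (n - ((n - pvMsdN n * 10 ^ Nat.log 10 n) / pvMsdN n + 1) * pvMsdN n) < f := by
        have := pvMu_lt (pvMsdN n) (Nat.log 10 n) n _ hd1 (by omega) hlo hhi hn'lt
        omega
      rw [hcastL, hfd, hcastN, ih _ _ hmu']
      have hsteps := pvSteps_batch n (pvMsdN n) (Nat.log 10 n) hd1 (by omega) hlo hhi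
      rw [hsteps]
      push_cast
      ring_nf

-- ===== VERDICT (by name: the statement is the Claim_ definition above) =====
theorem Operations_to_makezero_fromfirstInteger_spec : Claim_equal_Operations_to_makezero_fromfirstInteger := by
  intro N _
  unfold Spec_Operations_to_makezero_fromfirstInteger
  unfold Operations_to_makezero_fromfirstInteger Operations_to_makezero_fromfirstInteger_alt
  by_cases h : N ≤ 1000000000 ∧ N ≥ 1
  · obtain ⟨h1, h2⟩ := h
    rw [if_pos ⟨h1, h2⟩, if_neg (by omega)]
    obtain ⟨n, rfl⟩ : ∃ n : Nat, N = (n : Int) := ⟨N.toNat, by omega⟩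
    have hn1 : 1 ≤ n := by exact_mod_cast h2
    have hn9 : n ≤ 10 ^ 9 := by exact_mod_cast h1
    rw [Int.toNat_natCast, pvLoopA_eq (n + 1) n 0 (by omega)]
    rw [pvLoopB_eq 128 n 0 ?_]
    have hlog : Nat.log 10 n ≤ 9 := by
      by_contra hlt
      push Not at hlt
      have h10 : 10 ^ 10 ≤ 10 ^ Nat.log 10 n := Nat.pow_le_pow_right (by norm_num) hlt
      have := Nat.pow_log_le_self 10 (by omega : n ≠ 0)
      have : (10:Nat)^9 < 10^10 := by norm_num
      omega
    have := pvMsdN_lt_ten n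
    unfold pvMu
    omega
  · rw [if_neg h, if_pos (by omega)]
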